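-- pv_equiv track=rewrite | github.com/siddhu1716/Order_Agent | master/master_agent.py | _extract_task_type
-- ===== SOURCE A (Python) =====
-- def _extract_task_type(user_message: str, primary_intent: str) -> str:
--     """Extract specific task type from user message"""
--     message_lower = user_message.lower()
--
--     if primary_intent == "food":
--         if any(word in message_lower for word in ["plan", "meal", "dinner", "lunch", "breakfast"]):
--             return "meal_planning"
--         elif any(word in message_lower for word in ["recipe", "cook", "ingredient"]):
--             return "recipe_generation"
--         elif any(word in message_lower for word in ["grocery", "shopping", "list"]):
--             return "grocery_list"
--         else:
--             return "general"
--
--     elif primary_intent == "travel":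
--         if any(word in message_lower for word in ["plan", "trip", "vacation"]):
--             return "trip_planning"
--         elif any(word in message_lower for word in ["flight", "fly", "airline"]):
--             return "flight_search"
--         elif any(word in message_lower for word in ["hotel", "accommodation", "stay"]):
--             return "hotel_search"
--         elif any(word in message_lower for word in ["itinerary", "schedule", "plan"]):
--             return "itinerary_generation"
--         else:
--             return "general"
--
--     elif primary_intent == "shopping":
--         if any(word in message_lower for word in ["find", "product", "discover"]):
--             return "product_discovery"
--         elif any(word in message_lower for word in ["compare", "price", "cheaper"]):
--             return "price_comparison"
--         elif any(word in message_lower for word in ["deal", "discount", "sale"]):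
--             return "deal_finding"
--         elif any(word in message_lower for word in ["list", "buy", "purchase"]):
--             return "shopping_list"
--         else:
--             return "general"
--
--     elif primary_intent == "quick_commerce":
--         if any(word in message_lower for word in ["order", "get", "buy"]) and any(word in message_lower for word in ["tomatoes", "milk", "bread", "eggs", "onions", "potatoes", "rice", "dal", "vegetables", "fruits"]):
--             return "quick_order"
--         elif any(word in message_lower for word in ["compare", "price", "best", "deal"]):
--             return "compare_prices"
--         elif any(word in message_lower for word in ["status", "track", "where"]):
--             return "order_status"
--         else:
--             return "quick_order"
--
--     elif primary_intent == "payment":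
--         if any(word in message_lower for word in ["create", "order", "payment"]):
--             return "create_order"
--         elif any(word in message_lower for word in ["verify", "payment", "signature"]):
--             return "verify_payment"
--         elif any(word in message_lower for word in ["link", "payment.*link"]):
--             return "create_payment_link"
--         elif any(word in message_lower for word in ["refund", "return", "money"]):
--             return "refund_payment"
--         elif any(word in message_lower for word in ["methods", "payment.*methods"]):
--             return "get_payment_methods"
--         elif any(word in message_lower for word in ["history", "transaction", "past"]):
--             return "get_transaction_history"
--         else:
--             return "general"
--
--     return "general"
-- ===== SOURCE B (Python) =====
-- # B: two-stage evaluation — first compute the full set of fired keyword groups (no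
-- # short-circuiting), then decide via per-intent rules stated as conjunctions of group ids.
-- GROUPS = {
--     "food": [["plan", "meal", "dinner", "lunch", "breakfast"],
--              ["recipe", "cook", "ingredient"],
--              ["grocery", "shopping", "list"]],
--     "travel": [["plan", "trip", "vacation"],
--                ["flight", "fly", "airline"],
--                ["hotel", "accommodation", "stay"],
--                ["itinerary", "schedule", "plan"]],
--     "shopping": [["find", "product", "discover"],
--                  ["compare", "price", "cheaper"],
--                  ["deal", "discount", "sale"],
--                  ["list", "buy", "purchase"]],
--     "quick_commerce": [["order", "get", "buy"],
--                        ["tomatoes", "milk", "bread", "eggs", "onions", "potatoes",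
--                         "rice", "dal", "vegetables", "fruits"],
--                        ["compare", "price", "best", "deal"],
--                        ["status", "track", "where"]],
--     "payment": [["create", "order", "payment"],
--                 ["verify", "payment", "signature"],
--                 ["link", "payment.*link"],
--                 ["refund", "return", "money"],
--                 ["methods", "payment.*methods"],
--                 ["history", "transaction", "past"]],
-- }
--
-- DECISIONS = {
--     "food": ([((0,), "meal_planning"), ((1,), "recipe_generation"),
--               ((2,), "grocery_list")], "general"),
--     "travel": ([((0,), "trip_planning"), ((1,), "flight_search"),
--                 ((2,), "hotel_search"), ((3,), "itinerary_generation")], "general"),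
--     "shopping": ([((0,), "product_discovery"), ((1,), "price_comparison"),
--                   ((2,), "deal_finding"), ((3,), "shopping_list")], "general"),
--     "quick_commerce": ([((0, 1), "quick_order"), ((2,), "compare_prices"),
--                         ((3,), "order_status")], "quick_order"),
--     "payment": ([((0,), "create_order"), ((1,), "verify_payment"),
--                  ((2,), "create_payment_link"), ((3,), "refund_payment"),
--                  ((4,), "get_payment_methods"), ((5,), "get_transaction_history")], "general"),
-- }
--
--
-- def _extract_task_type(user_message: str, primary_intent: str) -> str:
--     msg = user_message.lower()
--     fired = {i for i, kws in enumerate(GROUPS.get(primary_intent, []))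
--              if any(w in msg for w in kws)}
--     rules, default = DECISIONS.get(primary_intent, ([], "general"))
--     for req, task in rules:
--         if all(g in fired for g in req):
--             return task
--     return default
-- ===== Notes on version B (the rewrite author's own statement) =====
-- stated objective: alternative
-- what changed: B evaluates in two stages: it first computes the full set of fired keyword groups for the intent (no short-circuiting, one enumerate pass), then picks the first rule whose required group-ids are all in that set, so the quick_commerce AND becomes an ordinary two-id conjunction instead of a special-cased branch chain.
import Mathlib
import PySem

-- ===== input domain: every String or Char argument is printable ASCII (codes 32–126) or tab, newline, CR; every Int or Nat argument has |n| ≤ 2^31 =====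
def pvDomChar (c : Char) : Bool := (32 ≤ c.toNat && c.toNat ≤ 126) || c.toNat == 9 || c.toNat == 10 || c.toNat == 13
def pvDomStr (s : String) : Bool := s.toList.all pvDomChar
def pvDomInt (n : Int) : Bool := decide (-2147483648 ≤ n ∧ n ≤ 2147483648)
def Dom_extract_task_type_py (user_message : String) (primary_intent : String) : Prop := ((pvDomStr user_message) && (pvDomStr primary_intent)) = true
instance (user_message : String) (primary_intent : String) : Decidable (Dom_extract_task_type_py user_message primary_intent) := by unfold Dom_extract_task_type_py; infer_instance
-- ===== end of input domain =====

-- B evaluates in two stages — compute the set of ALL fired keyword groups, then pick the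
-- first rule whose required group ids are all fired — instead of A's if/elif chains (objective: alternative).

-- ===== PORT A =====
def extract_task_type_py (user_message : String) (primary_intent : String) : String :=
  let ml := PySem.Str.lower user_message
  if primary_intent = "food" then
    if ["plan", "meal", "dinner", "lunch", "breakfast"].any (fun w => PySem.Str.isIn w ml) then "meal_planning"
    else if ["recipe", "cook", "ingredient"].any (fun w => PySem.Str.isIn w ml) then "recipe_generation"
    else if ["grocery", "shopping", "list"].any (fun w => PySem.Str.isIn w ml) then "grocery_list"
    else "general"
  else if primary_intent = "travel" then
    if ["plan", "trip", "vacation"].any (fun w => PySem.Str.isIn w ml) then "trip_planning"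
    else if ["flight", "fly", "airline"].any (fun w => PySem.Str.isIn w ml) then "flight_search"
    else if ["hotel", "accommodation", "stay"].any (fun w => PySem.Str.isIn w ml) then "hotel_search"
    else if ["itinerary", "schedule", "plan"].any (fun w => PySem.Str.isIn w ml) then "itinerary_generation"
    else "general"
  else if primary_intent = "shopping" then
    if ["find", "product", "discover"].any (fun w => PySem.Str.isIn w ml) then "product_discovery"
    else if ["compare", "price", "cheaper"].any (fun w => PySem.Str.isIn w ml) then "price_comparison"
    else if ["deal", "discount", "sale"].any (fun w => PySem.Str.isIn w ml) then "deal_finding"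
    else if ["list", "buy", "purchase"].any (fun w => PySem.Str.isIn w ml) then "shopping_list"
    else "general"
  else if primary_intent = "quick_commerce" then
    if ["order", "get", "buy"].any (fun w => PySem.Str.isIn w ml)
        && ["tomatoes", "milk", "bread", "eggs", "onions", "potatoes", "rice", "dal", "vegetables", "fruits"].any (fun w => PySem.Str.isIn w ml) then "quick_order"
    else if ["compare", "price", "best", "deal"].any (fun w => PySem.Str.isIn w ml) then "compare_prices"
    else if ["status", "track", "where"].any (fun w => PySem.Str.isIn w ml) then "order_status"
    else "quick_order"
  else if primary_intent = "payment" then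
    if ["create", "order", "payment"].any (fun w => PySem.Str.isIn w ml) then "create_order"
    else if ["verify", "payment", "signature"].any (fun w => PySem.Str.isIn w ml) then "verify_payment"
    else if ["link", "payment.*link"].any (fun w => PySem.Str.isIn w ml) then "create_payment_link"
    else if ["refund", "return", "money"].any (fun w => PySem.Str.isIn w ml) then "refund_payment"
    else if ["methods", "payment.*methods"].any (fun w => PySem.Str.isIn w ml) then "get_payment_methods"
    else if ["history", "transaction", "past"].any (fun w => PySem.Str.isIn w ml) then "get_transaction_history"
    else "general"
  else "general"

-- ===== PORT B =====
-- GROUPS: intent → ordered keyword groups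
def pvGROUPS : PySem.Dict String (List (List String)) :=
  PySem.Dict.mk
    [ ("food", [ ["plan", "meal", "dinner", "lunch", "breakfast"],
                 ["recipe", "cook", "ingredient"],
                 ["grocery", "shopping", "list"] ]),
      ("travel", [ ["plan", "trip", "vacation"],
                   ["flight", "fly", "airline"],
                   ["hotel", "accommodation", "stay"],
                   ["itinerary", "schedule", "plan"] ]),
      ("shopping", [ ["find", "product", "discover"],
                     ["compare", "price", "cheaper"],
                     ["deal", "discount", "sale"],
                     ["list", "buy", "purchase"] ]),
      ("quick_commerce", [ ["order", "get", "buy"],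
                           ["tomatoes", "milk", "bread", "eggs", "onions", "potatoes", "rice", "dal", "vegetables", "fruits"],
                           ["compare", "price", "best", "deal"],
                           ["status", "track", "where"] ]),
      ("payment", [ ["create", "order", "payment"],
                    ["verify", "payment", "signature"],
                    ["link", "payment.*link"],
                    ["refund", "return", "money"],
                    ["methods", "payment.*methods"],
                    ["history", "transaction", "past"] ]) ]

-- DECISIONS: intent → (rules as (required group ids, task), default)
def pvDECISIONS : PySem.Dict String (List (List Int × String) × String) :=
  PySem.Dict.mk
    [ ("food", ([ ([0], "meal_planning"), ([1], "recipe_generation"), ([2], "grocery_list") ], "general")),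
      ("travel", ([ ([0], "trip_planning"), ([1], "flight_search"), ([2], "hotel_search"), ([3], "itinerary_generation") ], "general")),
      ("shopping", ([ ([0], "product_discovery"), ([1], "price_comparison"), ([2], "deal_finding"), ([3], "shopping_list") ], "general")),
      ("quick_commerce", ([ ([0, 1], "quick_order"), ([2], "compare_prices"), ([3], "order_status") ], "quick_order")),
      ("payment", ([ ([0], "create_order"), ([1], "verify_payment"), ([2], "create_payment_link"),
                     ([3], "refund_payment"), ([4], "get_payment_methods"), ([5], "get_transaction_history") ], "general")) ]

-- fired = {i for i, kws in enumerate(groups) if any(w in msg for w in kws)}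
def pvFired (msg : String) (groups : List (List String)) : PySem.Set Int :=
  PySem.Set.ofList ((PySem.List.enumerate groups).filterMap
    (fun p => if p.2.any (fun w => PySem.Str.isIn w msg) then some p.1 else none))

-- for req, task in rules: if all(g in fired for g in req): return task ... return default
def pvSelect (fired : PySem.Set Int) (rules : List (List Int × String)) (dflt : String) : String :=
  match rules with
  | [] => dflt
  | (req, task) :: rest =>
    if req.all (fun g => PySem.Set.contains fired g) then task else pvSelect fired rest dflt

def extract_task_type_py_alt (user_message : String) (primary_intent : String) : String :=
  let msg := PySem.Str.lower user_message
  let fired := pvFired msg (PySem.Dict.getD pvGROUPS primary_intent [])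
  let rd := PySem.Dict.getD pvDECISIONS primary_intent ([], "general")
  pvSelect fired rd.1 rd.2

-- ===== PRECONDITION & SPEC =====
def Spec_extract_task_type_py (user_message : String) (primary_intent : String) (out : String) : Prop := out = extract_task_type_py_alt user_message primary_intent
instance (user_message : String) (primary_intent : String) (out : String) : Decidable (Spec_extract_task_type_py user_message primary_intent out) := by unfold Spec_extract_task_type_py; infer_instance

-- ===== CLAIM (what is proved, stated in full; the proofs are below) =====
def Claim_equal_extract_task_type_py : Prop := ∀ (user_message : String) (primary_intent : String), Dom_extract_task_type_py user_message primary_intent → Spec_extract_task_type_py user_message primary_intent (extract_task_type_py user_message primary_intent)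

-- ===== LEMMAS AND PROOFS =====
-- For each of the five table intents: abstract each group's any-test as a Bool, then both
-- the fired-set/selection pipeline and A's chain are closed Bool expressions — decide.
theorem pv_case_food (um : String) :
    extract_task_type_py um "food" = extract_task_type_py_alt um "food" := by
  simp only [extract_task_type_py, extract_task_type_py_alt, pvGROUPS, pvDECISIONS,
    PySem.Dict.getD, PySem.Dict.get?_mk_cons, String.reduceBEq, String.reduceEq,
    Bool.false_eq_true, if_false, reduceIte, Option.getD_some, pvFired,
    PySem.List.enumerate_cons, PySem.List.enumerate_nil, List.filterMap_cons, List.filterMap_nil]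
  generalize (["plan", "meal", "dinner", "lunch", "breakfast"].any (fun w => PySem.Str.isIn w (PySem.Str.lower um))) = b0
  generalize (["recipe", "cook", "ingredient"].any (fun w => PySem.Str.isIn w (PySem.Str.lower um))) = b1
  generalize (["grocery", "shopping", "list"].any (fun w => PySem.Str.isIn w (PySem.Str.lower um))) = b2
  revert b0 b1 b2; decide

theorem pv_case_travel (um : String) :
    extract_task_type_py um "travel" = extract_task_type_py_alt um "travel" := by
  simp only [extract_task_type_py, extract_task_type_py_alt, pvGROUPS, pvDECISIONS,
    PySem.Dict.getD, PySem.Dict.get?_mk_cons, String.reduceBEq, String.reduceEq,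
    Bool.false_eq_true, if_false, reduceIte, Option.getD_some, pvFired,
    PySem.List.enumerate_cons, PySem.List.enumerate_nil, List.filterMap_cons, List.filterMap_nil]
  generalize (["plan", "trip", "vacation"].any (fun w => PySem.Str.isIn w (PySem.Str.lower um))) = b0
  generalize (["flight", "fly", "airline"].any (fun w => PySem.Str.isIn w (PySem.Str.lower um))) = b1
  generalize (["hotel", "accommodation", "stay"].any (fun w => PySem.Str.isIn w (PySem.Str.lower um))) = b2
  generalize (["itinerary", "schedule", "plan"].any (fun w => PySem.Str.isIn w (PySem.Str.lower um))) = b3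
  revert b0 b1 b2 b3; decide

theorem pv_case_shopping (um : String) :
    extract_task_type_py um "shopping" = extract_task_type_py_alt um "shopping" := by
  simp only [extract_task_type_py, extract_task_type_py_alt, pvGROUPS, pvDECISIONS,
    PySem.Dict.getD, PySem.Dict.get?_mk_cons, String.reduceBEq, String.reduceEq,
    Bool.false_eq_true, if_false, reduceIte, Option.getD_some, pvFired,
    PySem.List.enumerate_cons, PySem.List.enumerate_nil, List.filterMap_cons, List.filterMap_nil]
  generalize (["find", "product", "discover"].any (fun w => PySem.Str.isIn w (PySem.Str.lower um))) = b0
  generalize (["compare", "price", "cheaper"].any (fun w => PySem.Str.isIn w (PySem.Str.lower um))) = b1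
  generalize (["deal", "discount", "sale"].any (fun w => PySem.Str.isIn w (PySem.Str.lower um))) = b2
  generalize (["list", "buy", "purchase"].any (fun w => PySem.Str.isIn w (PySem.Str.lower um))) = b3
  revert b0 b1 b2 b3; decide

theorem pv_case_quick_commerce (um : String) :
    extract_task_type_py um "quick_commerce" = extract_task_type_py_alt um "quick_commerce" := by
  simp only [extract_task_type_py, extract_task_type_py_alt, pvGROUPS, pvDECISIONS,
    PySem.Dict.getD, PySem.Dict.get?_mk_cons, String.reduceBEq, String.reduceEq,
    Bool.false_eq_true, if_false, reduceIte, Option.getD_some, pvFired,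
    PySem.List.enumerate_cons, PySem.List.enumerate_nil, List.filterMap_cons, List.filterMap_nil]
  generalize (["order", "get", "buy"].any (fun w => PySem.Str.isIn w (PySem.Str.lower um))) = b0
  generalize (["tomatoes", "milk", "bread", "eggs", "onions", "potatoes", "rice", "dal", "vegetables", "fruits"].any (fun w => PySem.Str.isIn w (PySem.Str.lower um))) = b1
  generalize (["compare", "price", "best", "deal"].any (fun w => PySem.Str.isIn w (PySem.Str.lower um))) = b2
  generalize (["status", "track", "where"].any (fun w => PySem.Str.isIn w (PySem.Str.lower um))) = b3
  revert b0 b1 b2 b3; decide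

theorem pv_case_payment (um : String) :
    extract_task_type_py um "payment" = extract_task_type_py_alt um "payment" := by
  simp only [extract_task_type_py, extract_task_type_py_alt, pvGROUPS, pvDECISIONS,
    PySem.Dict.getD, PySem.Dict.get?_mk_cons, String.reduceBEq, String.reduceEq,
    Bool.false_eq_true, if_false, reduceIte, Option.getD_some, pvFired,
    PySem.List.enumerate_cons, PySem.List.enumerate_nil, List.filterMap_cons, List.filterMap_nil]
  generalize (["create", "order", "payment"].any (fun w => PySem.Str.isIn w (PySem.Str.lower um))) = b0
  generalize (["verify", "payment", "signature"].any (fun w => PySem.Str.isIn w (PySem.Str.lower um))) = b1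
  generalize (["link", "payment.*link"].any (fun w => PySem.Str.isIn w (PySem.Str.lower um))) = b2
  generalize (["refund", "return", "money"].any (fun w => PySem.Str.isIn w (PySem.Str.lower um))) = b3
  generalize (["methods", "payment.*methods"].any (fun w => PySem.Str.isIn w (PySem.Str.lower um))) = b4
  generalize (["history", "transaction", "past"].any (fun w => PySem.Str.isIn w (PySem.Str.lower um))) = b5
  revert b0 b1 b2 b3 b4 b5; decide

-- any other intent: A falls through its chain; B's two lookups miss → empty rules, "general"
theorem pv_case_other (um pi : String) (h1 : ¬ pi = "food") (h2 : ¬ pi = "travel")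
    (h3 : ¬ pi = "shopping") (h4 : ¬ pi = "quick_commerce") (h5 : ¬ pi = "payment") :
    extract_task_type_py um pi = extract_task_type_py_alt um pi := by
  unfold extract_task_type_py extract_task_type_py_alt
  have e1 : ("food" == pi) = false := by simp [Ne.symm h1]
  have e2 : ("travel" == pi) = false := by simp [Ne.symm h2]
  have e3 : ("shopping" == pi) = false := by simp [Ne.symm h3]
  have e4 : ("quick_commerce" == pi) = false := by simp [Ne.symm h4]
  have e5 : ("payment" == pi) = false := by simp [Ne.symm h5]
  simp only [pvGROUPS, pvDECISIONS, PySem.Dict.getD, e1, e2, e3, e4, e5, if_false,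
    h1, h2, h3, h4, h5, PySem.Dict.get?, List.find?, Option.map_none, Option.getD_none,
    pvFired, PySem.List.enumerate_nil, List.filterMap_nil, pvSelect]

-- ===== VERDICT (by name: the statement is the Claim_ definition above) =====
theorem extract_task_type_py_spec : Claim_equal_extract_task_type_py := by
  intro um pi _
  unfold Spec_extract_task_type_py
  by_cases h1 : pi = "food"
  · subst h1; exact pv_case_food um
  · by_cases h2 : pi = "travel"
    · subst h2; exact pv_case_travel um
    · by_cases h3 : pi = "shopping"
      · subst h3; exact pv_case_shopping um
      · by_cases h4 : pi = "quick_commerce"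
        · subst h4; exact pv_case_quick_commerce um
        · by_cases h5 : pi = "payment"
          · subst h5; exact pv_case_payment um
          · exact pv_case_other um pi h1 h2 h3 h4 h5
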